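-- pv_equiv track=rewrite | github.com/STSARC001/ytpipline | components/drive_uploader.py | _enhance_tags
-- ===== SOURCE A (Python) =====
-- def _enhance_tags(tags):
--     """Enhance tags with trending and relevant terms."""
--     # Always add these essential tags
--     essential_tags = [
--         "AI", "artificial intelligence", "ai art", "ai video",
--         "ai animation", "ai generated", "machine learning",
--         "generative ai", "text to video", "neural network"
--     ]
--
--     # Add additional trending tags based on content
--     trending_tags = [
--         "trending", "viral", "amazing", "beautiful",
--         "satisfying", "oddly satisfying", "mindblowing"
--     ]
--
--     # Combine all tags
--     all_tags = list(tags)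
--
--     # Add essential tags if not already present
--     for tag in essential_tags:
--         if tag.lower() not in [t.lower() for t in all_tags]:
--             all_tags.append(tag)
--
--     # Add some trending tags
--     num_trending = min(3, len(trending_tags))
--     selected_trending = trending_tags[:num_trending]
--     for tag in selected_trending:
--         if tag.lower() not in [t.lower() for t in all_tags]:
--             all_tags.append(tag)
--
--     # Limit to 500 characters total (YouTube limit for all tags combined)
--     total_length = sum(len(tag) for tag in all_tags) + len(all_tags) - 1  # account for commas
--     if total_length > 500:
--         # Remove tags until under limit
--         while total_length > 500 and len(all_tags) > len(essential_tags):
--             # Remove the longest non-essential tag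
--             non_essential = [t for t in all_tags if t.lower() not in [e.lower() for e in essential_tags]]
--             if non_essential:
--                 longest = max(non_essential, key=len)
--                 all_tags.remove(longest)
--                 total_length = sum(len(tag) for tag in all_tags) + len(all_tags) - 1
--             else:
--                 break
--
--     return all_tags
-- ===== SOURCE B (Python) =====
-- def _enhance_tags(tags):
--     """Enhance tags with trending and relevant terms (single-pass build, sort-based trim)."""
--     essential_tags = [
--         "AI", "artificial intelligence", "ai art", "ai video",
--         "ai animation", "ai generated", "machine learning",
--         "generative ai", "text to video", "neural network"
--     ]
--     trending_tags = [
--         "trending", "viral", "amazing", "beautiful",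
--         "satisfying", "oddly satisfying", "mindblowing"
--     ]
--
--     # Build the tag list with an O(1) membership set of lowercased tags.
--     all_tags = list(tags)
--     seen = {t.lower() for t in all_tags}
--     for tag in essential_tags + trending_tags[:3]:
--         low = tag.lower()
--         if low not in seen:
--             all_tags.append(tag)
--             seen.add(low)
--
--     total = sum(len(t) for t in all_tags) + len(all_tags) - 1
--     if total <= 500:
--         return all_tags
--
--     # Trim: remove non-essential tags, longest first (ties: earliest first),
--     # with a running total instead of repeated rescans.
--     ess_lower = {e.lower() for e in essential_tags}
--     order = sorted(
--         ((i, t) for i, t in enumerate(all_tags) if t.lower() not in ess_lower),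
--         key=lambda p: (-len(p[1]), p[0]),
--     )
--     n = len(all_tags)
--     removed = set()
--     for i, t in order:
--         if total <= 500 or n <= len(essential_tags):
--             break
--         removed.add(i)
--         total -= len(t) + 1
--         n -= 1
--     return [t for i, t in enumerate(all_tags) if i not in removed]
-- ===== Notes on version B (the rewrite author's own statement) =====
-- stated objective: faster
-- what changed: B builds the tag list in one pass over a lowercase membership set instead of rescanning and re-lowering the whole list per candidate, and trims by sorting the non-essential entries once by (-length, index) and removing a prefix with a running total, instead of A's loop that rescans all tags for the longest non-essential one per removal.
import Mathlib
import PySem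

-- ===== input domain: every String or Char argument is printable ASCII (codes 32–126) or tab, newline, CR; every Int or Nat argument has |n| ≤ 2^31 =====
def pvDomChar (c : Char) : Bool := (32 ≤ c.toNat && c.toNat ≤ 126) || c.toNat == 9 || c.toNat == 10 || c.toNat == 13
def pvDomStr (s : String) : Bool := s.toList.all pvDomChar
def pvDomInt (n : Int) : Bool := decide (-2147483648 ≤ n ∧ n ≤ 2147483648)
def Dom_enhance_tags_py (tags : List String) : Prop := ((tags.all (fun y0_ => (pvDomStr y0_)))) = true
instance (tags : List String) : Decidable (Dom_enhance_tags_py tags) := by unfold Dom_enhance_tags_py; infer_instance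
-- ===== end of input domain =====

-- B replaces A's per-candidate rescan by one lowercase membership set and A's
-- quadratic remove-the-longest loop by one sort of the non-essential entries by
-- (-length, index) consumed with a running total (objective: faster).

-- shared literal constants of the module
def essentialTags : List String :=
  ["AI", "artificial intelligence", "ai art", "ai video",
   "ai animation", "ai generated", "machine learning",
   "generative ai", "text to video", "neural network"]

def trendingTags : List String :=
  ["trending", "viral", "amazing", "beautiful",
   "satisfying", "oddly satisfying", "mindblowing"]

-- ===== PORT A =====

-- one step of A's "add tag if its lowercase is not among the lowered tags" loop
def aAddTag (acc : List String) (tag : String) : List String :=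
  if !((acc.map PySem.Str.lower).contains (PySem.Str.lower tag)) then acc ++ [tag] else acc

-- A's `[t for t in all_tags if t.lower() not in [e.lower() for e in essential_tags]]`
def aNonEssential (all : List String) : List String :=
  all.filter (fun t => !((essentialTags.map PySem.Str.lower).contains (PySem.Str.lower t)))

-- A's `sum(len(tag) for tag in all_tags) + len(all_tags) - 1`
def aTotal (all : List String) : Int :=
  (all.map PySem.Str.len).sum + all.length - 1

-- termination helper for aTrim (cited by decreasing_by)
theorem pv_remove_length {xs : List String} {v : String} {ys : List String}
    (h : PySem.List.remove? xs v = some ys) : ys.length < xs.length := by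
  by_cases hv : v ∈ xs
  · rw [PySem.List.remove?_eq_some_erase xs v hv] at h
    cases h
    have h1 := List.length_erase_of_mem (a := v) (l := xs) hv
    have h2 : 0 < xs.length := List.length_pos_of_mem hv
    omega
  · rw [(PySem.List.remove?_eq_none_iff xs v).mpr hv] at h; cases h

-- A's `while total_length > 500 and len(all_tags) > len(essential_tags): …` loop
def aTrim (all : List String) : List String :=
  if aTotal all > 500 ∧ (all.length : Int) > (essentialTags.length : Int) then
    match hm : PySem.List.max? (aNonEssential all) PySem.Str.len with
    | none => all                                   -- `else: break` (no non-essential tag)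
    | some longest =>
      match h : PySem.List.remove? all longest with
      | none => all                                 -- unreachable: longest ∈ all_tags
      | some pruned => aTrim pruned
  else all
termination_by all.length
decreasing_by exact pv_remove_length h

def enhance_tags_py (tags : List String) : List String :=
  let all_tags := tags
  let afterEssential := essentialTags.foldl aAddTag all_tags
  let num_trending : Int := min 3 (trendingTags.length : Int)
  let selected_trending := PySem.List.slice trendingTags none (some num_trending)
  let all2 := selected_trending.foldl aAddTag afterEssential
  if aTotal all2 > 500 then aTrim all2 else all2

-- ===== PORT B =====

-- one step of B's build loop, carrying the set of lowercased tags seen so far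
def bBuildStep (st : List String × PySem.Set String) (tag : String) : List String × PySem.Set String :=
  let low := PySem.Str.lower tag
  if st.2.contains low then st else (st.1 ++ [tag], st.2.add low)

def bBuild (tags : List String) : List String :=
  ((essentialTags ++ PySem.List.slice trendingTags none (some 3)).foldl bBuildStep
    (tags, PySem.Set.ofList (tags.map PySem.Str.lower))).1

-- B's `ess_lower = {e.lower() for e in essential_tags}`
def bEssLower : PySem.Set String := PySem.Set.ofList (essentialTags.map PySem.Str.lower)

-- B's `(i, t) for i, t in enumerate(all_tags) if t.lower() not in ess_lower`
def neP (all : List String) : List (Int × String) :=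
  (PySem.List.enumerate all 0).filter (fun p => !(bEssLower.contains (PySem.Str.lower p.2)))

-- B's `sorted(…, key=lambda p: (-len(p[1]), p[0]))`
def bOrder (all : List String) : List (Int × String) :=
  PySem.List.sorted2 (neP all) (fun p => -(PySem.Str.len p.2)) (fun p => p.1)

-- B's removal loop with running total and count
def bGreedy : List (Int × String) → Int → Int → PySem.Set Int → PySem.Set Int
  | [], _, _, removed => removed
  | (i, t) :: rest, total, n, removed =>
    if total ≤ 500 ∨ n ≤ (essentialTags.length : Int) then removed
    else bGreedy rest (total - (PySem.Str.len t + 1)) (n - 1) (removed.add i)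

def enhance_tags_py_alt (tags : List String) : List String :=
  let all := bBuild tags
  let total := (all.map PySem.Str.len).sum + all.length - 1
  if total ≤ 500 then all
  else
    let removed := bGreedy (bOrder all) total (all.length : Int) PySem.Set.empty
    ((PySem.List.enumerate all 0).filter (fun q => !(removed.contains q.1))).map Prod.snd

-- ===== PRECONDITION & SPEC =====
def Spec_enhance_tags_py (tags : List String) (out : List String) : Prop := out = enhance_tags_py_alt tags
instance (tags : List String) (out : List String) : Decidable (Spec_enhance_tags_py tags out) := by unfold Spec_enhance_tags_py; infer_instance

-- ===== CLAIM (what is proved, stated in full; the proofs are below) =====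
def Claim_equal_enhance_tags_py : Prop := ∀ (tags : List String), Dom_enhance_tags_py tags → Spec_enhance_tags_py tags (enhance_tags_py tags)

-- ===== LEMMAS AND PROOFS =====

-- the boolean "before" relation sorted2 uses for B's (-len, index) key
def blt (p q : Int × String) : Bool :=
  decide ((-(PySem.Str.len p.2)) < (-(PySem.Str.len q.2))) ||
    (!decide ((-(PySem.Str.len q.2)) < (-(PySem.Str.len p.2))) && decide (p.1 < q.1))

theorem pv_blt_iff (p q : Int × String) :
    blt p q = true ↔
      (PySem.Str.len q.2 < PySem.Str.len p.2 ∨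
        (PySem.Str.len q.2 = PySem.Str.len p.2 ∧ p.1 < q.1)) := by
  simp only [blt, Bool.or_eq_true, Bool.and_eq_true, Bool.not_eq_true', decide_eq_true_eq,
    decide_eq_false_iff_not]
  omega

theorem pv_bOrder_eq (all : List String) :
    bOrder all = (neP all).foldl (fun acc x => PySem.List.insertBy blt x acc) [] := by
  rfl

theorem pv_insertBy_perm (x : Int × String) (acc : List (Int × String)) :
    (PySem.List.insertBy blt x acc).Perm (x :: acc) := by
  induction acc with
  | nil => simp [PySem.List.insertBy]
  | cons y ys ih =>
    rw [PySem.List.insertBy]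
    by_cases h : blt x y = true
    · simp [h]
    · simp only [h, if_false]
      exact (ih.cons y).trans (List.Perm.swap x y ys)

theorem pv_blt_trans {a b c : Int × String} (h1 : blt a b = true) (h2 : blt b c = true) :
    blt a c = true := by
  rw [pv_blt_iff] at h1 h2 ⊢; omega

theorem pv_blt_total {a b : Int × String} (h : ¬ blt a b = true) (hne : a.1 ≠ b.1) :
    blt b a = true := by
  rw [pv_blt_iff] at h ⊢; omega

theorem pv_insertBy_pairwise (x : Int × String) (acc : List (Int × String))
    (hpw : acc.Pairwise (fun a b => blt a b = true))
    (hne : ∀ y ∈ acc, y.1 ≠ x.1) :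
    (PySem.List.insertBy blt x acc).Pairwise (fun a b => blt a b = true) := by
  induction acc with
  | nil => simp [PySem.List.insertBy]
  | cons y ys ih =>
    rw [List.pairwise_cons] at hpw
    obtain ⟨hy, hys⟩ := hpw
    rw [PySem.List.insertBy]
    by_cases h : blt x y = true
    · simp only [h, if_true]
      refine List.Pairwise.cons ?_ (List.Pairwise.cons hy hys)
      intro z hz
      rcases List.mem_cons.mp hz with rfl | hz
      · exact h
      · exact pv_blt_trans h (hy z hz)
    · simp only [h, if_false]
      refine List.Pairwise.cons ?_ (ih hys (fun y hy => hne y (List.mem_cons_of_mem _ hy)))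
      intro z hz
      rcases (PySem.List.mem_insertBy blt x z ys).mp hz with rfl | hz
      · exact pv_blt_total h (fun hh => hne y List.mem_cons_self hh.symm)
      · exact hy z hz

theorem pv_foldl_insert (xs : List (Int × String)) : ∀ acc : List (Int × String),
    acc.Pairwise (fun a b => blt a b = true) →
    ((acc ++ xs).map Prod.fst).Nodup →
    (xs.foldl (fun acc x => PySem.List.insertBy blt x acc) acc).Perm (acc ++ xs) ∧
    (xs.foldl (fun acc x => PySem.List.insertBy blt x acc) acc).Pairwise (fun a b => blt a b = true) := by
  induction xs with
  | nil =>
    intro acc h _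
    simpa using h
  | cons x xs ih =>
    intro acc hpw hnodup
    have hperm1 := pv_insertBy_perm x acc
    have hne : ∀ y ∈ acc, y.1 ≠ x.1 := by
      intro y hy hEq
      have hN : (acc.map Prod.fst ++ x.1 :: xs.map Prod.fst).Nodup := by simpa using hnodup
      rw [List.nodup_append] at hN
      exact hN.2.2 y.1 (List.mem_map_of_mem hy) x.1 List.mem_cons_self hEq
    have hpw' := pv_insertBy_pairwise x acc hpw hne
    have hmid : (PySem.List.insertBy blt x acc ++ xs).Perm (acc ++ x :: xs) := by
      exact (hperm1.append_right xs).trans List.perm_middle.symm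
    have hnodup' : ((PySem.List.insertBy blt x acc ++ xs).map Prod.fst).Nodup :=
      ((hmid.map Prod.fst).nodup_iff).mpr hnodup
    obtain ⟨P, W⟩ := ih (PySem.List.insertBy blt x acc) hpw' hnodup'
    exact ⟨by simpa using P.trans hmid, W⟩

theorem pv_neP_pairwise (all : List String) :
    (neP all).Pairwise (fun p q => p.1 < q.1) := by
  exact List.Pairwise.sublist List.filter_sublist (PySem.List.pairwise_lt_enumerate all 0)

theorem pv_neP_nodup (all : List String) : ((neP all).map Prod.fst).Nodup := by
  exact List.pairwise_map.mpr ((pv_neP_pairwise all).imp fun h => Int.ne_of_lt h)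

theorem pv_bOrder_perm (all : List String) : (bOrder all).Perm (neP all) := by
  exact PySem.List.sorted2_perm _ _ _ _

theorem pv_bOrder_pairwise (all : List String) :
    (bOrder all).Pairwise (fun a b => blt a b = true) := by
  rw [pv_bOrder_eq]
  exact (pv_foldl_insert (neP all) [] List.Pairwise.nil (by simpa using pv_neP_nodup all)).2

-- any permutation of neP all that is blt-sorted IS bOrder all
theorem pv_bOrder_char (all : List String) (ys : List (Int × String))
    (hperm : ys.Perm (neP all)) (hpw : ys.Pairwise (fun a b => blt a b = true)) :
    bOrder all = ys := by
  refine List.eq_of_perm_of_sorted (le := fun a b => blt a b = true) ?_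
    (pv_bOrder_pairwise all) hpw ((pv_bOrder_perm all).trans hperm.symm)
  intro a b _ _ h1 h2
  exfalso
  rw [pv_blt_iff] at h1 h2
  omega

theorem pv_bool_iff {a b : Bool} (h : (a = true) ↔ (b = true)) : a = b := by
  cases a <;> cases b <;> simp_all

theorem pv_set_contains {α : Type} [BEq α] [LawfulBEq α] (s : PySem.Set α) (v : α) :
    s.contains v = true ↔ v ∈ s := by
  simp only [PySem.Set.contains]
  exact List.contains_iff_mem

theorem pv_ofList_contains (xs : List String) (v : String) :
    (PySem.Set.ofList xs).contains v = xs.contains v := by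
  apply pv_bool_iff
  rw [pv_set_contains, PySem.Set.mem_ofList]
  exact List.contains_iff_mem.symm

-- the fold step of Python max(xs, key=len)
def mStep (acc : Option String) (x : String) : Option String :=
  match acc with
  | none => some x
  | some mm => if PySem.Str.len mm < PySem.Str.len x then some x else some mm

theorem pv_max_unfold (ws : List String) :
    PySem.List.max? ws PySem.Str.len = ws.foldl mStep none := by
  unfold PySem.List.max?
  congr 1
  funext acc x
  cases acc <;> rfl

theorem pv_max_keep (ws : List String) (m : String)
    (h : ∀ w ∈ ws, PySem.Str.len w ≤ PySem.Str.len m) :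
    ws.foldl mStep (some m) = some m := by
  induction ws with
  | nil => rfl
  | cons w ws ih =>
    have hw : ¬ PySem.Str.len m < PySem.Str.len w := by
      have := h w (by simp); omega
    simp only [List.foldl_cons, mStep, hw, if_false]
    exact ih (fun w hw => h w (by simp [hw]))

theorem pv_max_aux (bs : List String) (m : String)
    (hb : ∀ b ∈ bs, PySem.Str.len b ≤ PySem.Str.len m) :
    ∀ (as : List String) (m' : String), (∀ a ∈ as, PySem.Str.len a < PySem.Str.len m) →
      PySem.Str.len m' < PySem.Str.len m →
      (as ++ m :: bs).foldl mStep (some m') = some m := by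
  intro as
  induction as with
  | nil =>
    intro m' _ hm'
    simp only [List.nil_append, List.foldl_cons, mStep, hm', if_true]
    exact pv_max_keep bs m hb
  | cons a as ih =>
    intro m' ha hm'
    have haa : PySem.Str.len a < PySem.Str.len m := ha a (by simp)
    simp only [List.cons_append, List.foldl_cons, mStep]
    by_cases hcm : PySem.Str.len m' < PySem.Str.len a
    · simp only [hcm, if_true]
      exact ih a (fun z hz => ha z (by simp [hz])) haa
    · simp only [hcm, if_false]
      exact ih m' (fun z hz => ha z (by simp [hz])) hm'

theorem pv_max_first (as bs : List String) (m : String)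
    (ha : ∀ a ∈ as, PySem.Str.len a < PySem.Str.len m)
    (hb : ∀ b ∈ bs, PySem.Str.len b ≤ PySem.Str.len m) :
    PySem.List.max? (as ++ m :: bs) PySem.Str.len = some m := by
  rw [pv_max_unfold]
  cases as with
  | nil =>
    simp only [List.nil_append, List.foldl_cons, mStep]
    exact pv_max_keep bs m hb
  | cons a as' =>
    simp only [List.cons_append, List.foldl_cons, mStep]
    exact pv_max_aux bs m hb as' a (fun z hz => ha z (by simp [hz])) (ha a (by simp))

theorem pv_values (all : List String) : aNonEssential all = (neP all).map Prod.snd := by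
  have hpred : (fun p : Int × String => !(bEssLower.contains (PySem.Str.lower p.2)))
      = ((fun t => !((essentialTags.map PySem.Str.lower).contains (PySem.Str.lower t))) ∘ Prod.snd) := by
    funext p
    simp [bEssLower, pv_ofList_contains, Function.comp]
  unfold aNonEssential neP
  rw [hpred, ← List.filter_map, PySem.List.map_snd_enumerate]

theorem pv_erase_eq_eraseIdx (m : String) :
    ∀ (l : List String) (i : Nat) (hi : i < l.length), l[i] = m →
      (∀ j (hj : j < i), l[j]'(by omega) ≠ m) → l.erase m = l.eraseIdx i := by
  intro l
  induction l with
  | nil => intro i hi; simp at hi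
  | cons x t ih =>
    intro i hi hv hfirst
    cases i with
    | zero =>
      simp only [List.getElem_cons_zero] at hv
      subst hv
      simp only [List.eraseIdx_cons_zero]
      exact List.erase_cons_head x t
    | succ i =>
      have hx : x ≠ m := by
        have := hfirst 0 (Nat.succ_pos i)
        simpa using this
      rw [List.erase_cons_tail (by simpa using hx), List.eraseIdx_cons_succ]
      congr 1
      exact ih i (by simpa using hi) (by simpa using hv)
        (fun j hj => by have := hfirst (j+1) (by omega); simpa using this)

theorem pv_enumerate_shift (xs : List String) : ∀ s : Int,
    PySem.List.enumerate xs s =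
      (PySem.List.enumerate xs (s + 1)).map (fun q => (q.1 - 1, q.2)) := by
  induction xs with
  | nil => intro s; simp [PySem.List.enumerate_nil]
  | cons x xs ih =>
    intro s
    rw [PySem.List.enumerate_cons, PySem.List.enumerate_cons, List.map_cons]
    congr 1
    · show (s, x) = (s + 1 - 1, x)
      norm_num
    · exact ih (s + 1)

theorem pv_mem_enumerate_bounds {xs : List String} {s : Int} {q : Int × String}
    (h : q ∈ PySem.List.enumerate xs s) : s ≤ q.1 ∧ q.1 < s + xs.length := by
  rw [PySem.List.mem_enumerate_iff] at h
  obtain ⟨k, hk, rfl⟩ := h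
  simp only []
  omega

-- the removed indices of bGreedy, as a plain list (decisions ignore the set)
def gL : List (Int × String) → Int → Int → List Int
  | [], _, _ => []
  | (i, t) :: rest, total, n =>
    if total ≤ 500 ∨ n ≤ (essentialTags.length : Int) then []
    else i :: gL rest (total - (PySem.Str.len t + 1)) (n - 1)

theorem pv_mem_bGreedy : ∀ (ord : List (Int × String)) (T N : Int) (rem : PySem.Set Int) (x : Int),
    x ∈ bGreedy ord T N rem ↔ x ∈ rem ∨ x ∈ gL ord T N := by
  intro ord
  induction ord with
  | nil => intro T N rem x; simp [bGreedy, gL]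
  | cons p rest ih =>
    intro T N rem x
    obtain ⟨i, t⟩ := p
    by_cases hc : T ≤ 500 ∨ N ≤ (essentialTags.length : Int)
    · simp [bGreedy, gL, hc]
    · simp only [bGreedy, gL, hc, if_false]
      rw [ih]
      simp only [PySem.Set.mem_add, List.mem_cons]
      tauto

def decIdx (k j : Int) : Int := if k < j then j - 1 else j
def decPair (k : Int) (q : Int × String) : Int × String := (decIdx k q.1, q.2)

theorem pv_gL_map (k : Int) : ∀ (ord : List (Int × String)) (T N : Int),
    gL (ord.map (decPair k)) T N = (gL ord T N).map (decIdx k) := by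
  intro ord
  induction ord with
  | nil => intro T N; simp [gL]
  | cons p rest ih =>
    intro T N
    obtain ⟨i, t⟩ := p
    by_cases hc : T ≤ 500 ∨ N ≤ (essentialTags.length : Int) <;>
      simp [gL, decPair, hc, ih]

theorem pv_gL_subset : ∀ (ord : List (Int × String)) (T N : Int) (x : Int),
    x ∈ gL ord T N → x ∈ ord.map Prod.fst := by
  intro ord
  induction ord with
  | nil => intro T N x h; simp [gL] at h
  | cons p rest ih =>
    intro T N x h
    obtain ⟨i, t⟩ := p
    by_cases hc : T ≤ 500 ∨ N ≤ (essentialTags.length : Int)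
    · simp [gL, hc] at h
    · simp only [gL, hc, if_false, List.mem_cons] at h
      rcases h with rfl | h
      · simp
      · simpa using List.mem_cons_of_mem _ (ih (T - (PySem.Str.len t + 1)) (N - 1) x h)

-- removing index t.length from t ++ x :: d, phrased on the final filters
theorem pv_filter_shift (t d : List String) (x : String) (P Q : Int → Bool)
    (hx : P (t.length : Int) = true)
    (hlow : ∀ c : Int, 0 ≤ c → c < (t.length : Int) → Q c = P c)
    (hhigh : ∀ c : Int, (t.length : Int) ≤ c → Q c = P (c + 1)) :
    ((PySem.List.enumerate (t ++ x :: d) 0).filter (fun q => !(P q.1))).map Prod.snd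
      = ((PySem.List.enumerate (t ++ d) 0).filter (fun q => !(Q q.1))).map Prod.snd := by
  have e1 : PySem.List.enumerate (t ++ x :: d) 0 =
      PySem.List.enumerate t 0 ++ ((t.length : Int), x) :: PySem.List.enumerate d ((t.length : Int) + 1) := by
    rw [PySem.List.enumerate_append, PySem.List.enumerate_cons]
    norm_num
  have e2 : PySem.List.enumerate (t ++ d) 0 =
      PySem.List.enumerate t 0 ++ PySem.List.enumerate d ((t.length : Int)) := by
    rw [PySem.List.enumerate_append]
    norm_num
  rw [e1, e2, List.filter_append, List.filter_append, List.map_append, List.map_append]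
  congr 1
  · congr 1
    apply List.filter_congr
    intro q hq
    have hb := pv_mem_enumerate_bounds hq
    rw [hlow q.1 (by omega) (by omega)]
  · rw [List.filter_cons_of_neg (by simp [hx]),
      pv_enumerate_shift d ((t.length : Int)), List.filter_map, List.map_map]
    have hsnd : Prod.snd ∘ (fun q : Int × String => (q.1 - 1, q.2)) = Prod.snd := rfl
    rw [hsnd]
    congr 1
    apply List.filter_congr
    intro q hq
    have hb := pv_mem_enumerate_bounds hq
    have : Q (q.1 - 1) = P q.1 := by
      have h2 := hhigh (q.1 - 1) (by omega)
      have h3 : q.1 - 1 + 1 = q.1 := by omega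
      rw [h2, h3]
    simpa [Function.comp] using (congrArg (fun b => !b) this).symm

theorem pv_filter_empty (all : List String) :
    ((PySem.List.enumerate all 0).filter
      (fun q => !((PySem.Set.empty : PySem.Set Int).contains q.1))).map Prod.snd = all := by
  have h : (PySem.List.enumerate all 0).filter
      (fun q => !((PySem.Set.empty : PySem.Set Int).contains q.1)) = PySem.List.enumerate all 0 :=
    List.filter_eq_self.mpr (fun a _ => rfl)
  rw [h, PySem.List.map_snd_enumerate]

-- A's trim loop equals B's sort-and-filter trim, for every list
theorem pv_trim : ∀ (n : Nat) (all : List String), all.length ≤ n →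
    aTrim all = ((PySem.List.enumerate all 0).filter
      (fun q => !((bGreedy (bOrder all) (aTotal all) (all.length : Int) PySem.Set.empty).contains q.1))).map Prod.snd := by
  intro n
  induction n with
  | zero =>
    intro all hlen
    have hn : all = [] := List.eq_nil_of_length_eq_zero (by omega)
    subst hn
    rw [aTrim, if_neg (by decide)]
    rfl
  | succ n ih =>
    intro all hlen
    by_cases hc : aTotal all > 500 ∧ (all.length : Int) > (essentialTags.length : Int)
    case neg =>
      have hset : bGreedy (bOrder all) (aTotal all) ((all.length : Int)) PySem.Set.empty
          = PySem.Set.empty := by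
        cases ho : bOrder all with
        | nil => simp [bGreedy]
        | cons q rest' =>
          obtain ⟨i, t⟩ := q
          simp only [bGreedy]
          rw [if_pos (by omega)]
      rw [aTrim, if_neg hc, hset, pv_filter_empty]
    case pos =>
      by_cases hne : neP all = []
      · have hmax : PySem.List.max? (aNonEssential all) PySem.Str.len = none := by
          rw [PySem.List.max?_eq_none_iff, pv_values, hne]
          rfl
        have horder : bOrder all = [] := by
          rw [pv_bOrder_eq, hne]
          rfl
        rw [aTrim, if_pos hc, hmax, horder]
        show all = _
        simp only [bGreedy]
        rw [pv_filter_empty]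
      · obtain ⟨p, rest, horder⟩ : ∃ p rest, bOrder all = p :: rest := by
          cases ho : bOrder all with
          | nil =>
            exfalso
            apply hne
            have hp2 := pv_bOrder_perm all
            rw [ho] at hp2
            exact List.Perm.eq_nil hp2.symm
          | cons p rest => exact ⟨p, rest, rfl⟩
        obtain ⟨pi, pt⟩ := p
        have hpw := pv_bOrder_pairwise all
        have hperm := pv_bOrder_perm all
        rw [horder] at hpw hperm
        have hpmem : ((pi, pt)) ∈ neP all := hperm.subset List.mem_cons_self
        have hpe := (List.mem_filter.mp hpmem).1
        have hpred := (List.mem_filter.mp hpmem).2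
        rw [PySem.List.mem_enumerate_iff] at hpe
        obtain ⟨k, hk, hpk⟩ := hpe
        rw [Prod.mk.injEq] at hpk
        obtain ⟨hp1, hp2⟩ := hpk
        have hp1' : pi = (k : Int) := by omega
        subst hp1'
        have htl : (all.take k).length = k := by
          simp [List.length_take]
          omega
        have hall : all = all.take k ++ pt :: all.drop (k+1) := by
          conv_lhs => rw [← List.take_append_drop k all]
          rw [List.drop_eq_getElem_cons hk, ← hp2]
        set A_ := (PySem.List.enumerate (all.take k) 0).filter
            (fun q => !(bEssLower.contains (PySem.Str.lower q.2))) with hA_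
        set B_ := (PySem.List.enumerate (all.drop (k+1)) ((k:Int)+1)).filter
            (fun q => !(bEssLower.contains (PySem.Str.lower q.2))) with hB_
        have hneP2 : neP all = A_ ++ ((k:Int), pt) :: B_ := by
          rw [hA_, hB_]
          unfold neP
          conv_lhs => rw [hall]
          rw [PySem.List.enumerate_append, PySem.List.enumerate_cons]
          rw [show (0:Int) + ((all.take k).length : Int) = (k:Int) by simp [htl]]
          rw [List.filter_append]
          have hnm : PySem.Str.lower pt ∉ bEssLower := by
            intro hm
            rw [(pv_set_contains bEssLower (PySem.Str.lower pt)).mpr hm] at hpred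
            simp at hpred
          simp [List.filter_cons, hnm]
        have hA_lt : ∀ q ∈ A_, q.1 < (k : Int) := by
          intro q hq
          rw [hA_] at hq
          have hb := pv_mem_enumerate_bounds (List.mem_filter.mp hq).1
          rw [htl] at hb
          omega
        have hB_gt : ∀ q ∈ B_, (k : Int) < q.1 := by
          intro q hq
          rw [hB_] at hq
          have hb := pv_mem_enumerate_bounds (List.mem_filter.mp hq).1
          omega
        have hrest : rest.Perm (A_ ++ B_) := by
          have h1 : (((k:Int), pt) :: rest).Perm (((k:Int), pt) :: (A_ ++ B_)) :=
            hperm.trans (by rw [hneP2]; exact List.perm_middle)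
          exact h1.cons_inv
        have hp_blt : ∀ q ∈ rest, blt ((k:Int), pt) q = true := (List.pairwise_cons.mp hpw).1
        have hAlt : ∀ a ∈ A_, PySem.Str.len a.2 < PySem.Str.len pt := by
          intro a ha
          have haR : a ∈ rest := hrest.symm.subset (List.mem_append_left _ ha)
          have hb := (pv_blt_iff _ _).mp (hp_blt a haR)
          have h2 := hA_lt a ha
          dsimp only at hb
          omega
        have hBle : ∀ b ∈ B_, PySem.Str.len b.2 ≤ PySem.Str.len pt := by
          intro b hbm
          have hbR : b ∈ rest := hrest.symm.subset (List.mem_append_right _ hbm)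
          have hb := (pv_blt_iff _ _).mp (hp_blt b hbR)
          dsimp only at hb
          omega
        have hmax : PySem.List.max? (aNonEssential all) PySem.Str.len = some pt := by
          rw [pv_values, hneP2, List.map_append, List.map_cons]
          exact pv_max_first _ _ _
            (by intro z hz; obtain ⟨a, ha, rfl⟩ := List.mem_map.mp hz; exact hAlt a ha)
            (by intro z hz; obtain ⟨b, hbm, rfl⟩ := List.mem_map.mp hz; exact hBle b hbm)
        have hfirst : ∀ j (hj : j < k), all[j]'(by omega) ≠ pt := by
          intro j hj hEq
          have hq : ((j:Int), pt) ∈ neP all := by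
            unfold neP
            rw [List.mem_filter]
            refine ⟨?_, hpred⟩
            rw [PySem.List.mem_enumerate_iff]
            exact ⟨j, by omega, by rw [Prod.mk.injEq]; exact ⟨by omega, hEq.symm⟩⟩
          have hqrest : ((j:Int), pt) ∈ rest := by
            rcases List.mem_cons.mp ((hperm.mem_iff).mpr hq) with heq | h3
            · rw [Prod.mk.injEq] at heq
              have : (j:Int) = (k:Int) := heq.1
              omega
            · exact h3
          have hb := (pv_blt_iff _ _).mp (hp_blt _ hqrest)
          dsimp only at hb
          omega
        have hmem : pt ∈ all := by
          rw [hp2]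
          exact List.getElem_mem hk
        have hremove : PySem.List.remove? all pt = some (all.eraseIdx k) := by
          rw [PySem.List.remove?_eq_some_erase all pt hmem,
            pv_erase_eq_eraseIdx pt all k hk hp2.symm hfirst]
        have hstep : aTrim all = aTrim (all.eraseIdx k) := by
          rw [aTrim, if_pos hc]
          split
          · next hnone => rw [hmax] at hnone; cases hnone
          · next longest hsome =>
            rw [hmax] at hsome
            injection hsome with hl
            subst hl
            split
            · next hnone2 => rw [hremove] at hnone2; cases hnone2
            · next pruned hsome2 => rw [hremove] at hsome2; cases hsome2; rfl
        have hlen' : (all.eraseIdx k).length ≤ n := by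
          have hL := List.length_eraseIdx (l := all) (i := k)
          rw [if_pos hk] at hL
          omega
        have hIH := ih (all.eraseIdx k) hlen'
        have hTot : aTotal (all.eraseIdx k) = aTotal all - (PySem.Str.len pt + 1) := by
          rw [List.eraseIdx_eq_take_drop_succ]
          conv_rhs => rw [hall]
          simp only [aTotal, List.map_append, List.sum_append, List.length_append,
            List.map_cons, List.sum_cons, List.length_cons]
          push_cast
          ring
        have hLen : (((all.eraseIdx k).length : Int)) = (all.length : Int) - 1 := by
          have hL := List.length_eraseIdx (l := all) (i := k)
          rw [if_pos hk] at hL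
          rw [hL]
          omega
        have hneP' : neP (all.eraseIdx k) = A_ ++ B_.map (fun q => (q.1 - 1, q.2)) := by
          rw [hA_, hB_]
          rw [List.eraseIdx_eq_take_drop_succ]
          unfold neP
          rw [PySem.List.enumerate_append]
          rw [show (0:Int) + ((all.take k).length : Int) = (k:Int) by simp [htl]]
          rw [List.filter_append]
          congr 1
          rw [pv_enumerate_shift (all.drop (k+1)) ((k:Int)), List.filter_map]
          rfl
        have hfst_ne : ∀ q ∈ rest, q.1 ≠ (k:Int) := by
          intro q hq
          rcases List.mem_append.mp (hrest.subset hq) with h | h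
          · have := hA_lt q h; omega
          · have := hB_gt q h; omega
        have hdecA : ∀ a ∈ A_, decPair (k:Int) a = a := by
          intro a ha
          have := hA_lt a ha
          unfold decPair decIdx
          rw [if_neg (by omega)]
        have hdecB : ∀ b ∈ B_, decPair (k:Int) b = (b.1 - 1, b.2) := by
          intro b hbm
          have := hB_gt b hbm
          unfold decPair decIdx
          rw [if_pos (by omega)]
        have hpermB : (rest.map (decPair (k:Int))).Perm (A_ ++ B_.map (fun q => (q.1 - 1, q.2))) := by
          refine (hrest.map (decPair (k:Int))).trans ?_
          rw [List.map_append]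
          have e1 : A_.map (decPair (k:Int)) = A_ := by
            have h0 : A_.map (decPair (k:Int)) = A_.map id := List.map_congr_left (fun a ha => hdecA a ha)
            rw [h0, List.map_id]
          have e2 : B_.map (decPair (k:Int)) = B_.map (fun q => (q.1 - 1, q.2)) :=
            List.map_congr_left hdecB
          rw [e1, e2]
        have hpwdec : (rest.map (decPair (k:Int))).Pairwise (fun a b => blt a b = true) := by
          rw [List.pairwise_map]
          refine List.Pairwise.imp_of_mem ?_ (List.pairwise_cons.mp hpw).2
          intro a b ha hb hab
          have hna := hfst_ne a ha
          have hnb := hfst_ne b hb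
          rw [pv_blt_iff] at hab ⊢
          unfold decPair decIdx
          dsimp only
          split_ifs <;> omega
        have horder' : bOrder (all.eraseIdx k) = rest.map (decPair (k:Int)) := by
          apply pv_bOrder_char
          · rw [hneP']; exact hpermB
          · exact hpwdec
        set S := gL rest (aTotal all - (PySem.Str.len pt + 1)) ((all.length : Int) - 1) with hS
        have hSsub : ∀ j ∈ S, j ≠ (k:Int) := by
          intro j hj
          have hin := pv_gL_subset rest _ _ j (by rw [← hS]; exact hj)
          obtain ⟨q, hq, hq1⟩ := List.mem_map.mp hin
          rw [← hq1]
          exact hfst_ne q hq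
        have hmemL : ∀ c : Int,
            ((bGreedy (bOrder all) (aTotal all) ((all.length : Int)) PySem.Set.empty).contains c = true)
              ↔ (c = (k:Int) ∨ c ∈ S) := by
          intro c
          rw [pv_set_contains, horder]
          simp only [bGreedy]
          rw [if_neg (by omega), pv_mem_bGreedy, ← hS]
          simp [PySem.Set.mem_add, PySem.Set.empty]
        have hmemR : ∀ c : Int,
            ((bGreedy (bOrder (all.eraseIdx k)) (aTotal (all.eraseIdx k)) (((all.eraseIdx k).length : Int)) PySem.Set.empty).contains c = true)
              ↔ c ∈ S.map (decIdx (k:Int)) := by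
          intro c
          rw [pv_set_contains, horder', hTot, hLen, pv_mem_bGreedy, pv_gL_map, ← hS]
          simp [PySem.Set.empty]
        rw [hstep, hIH]
        have e_all : PySem.List.enumerate all 0
            = PySem.List.enumerate (all.take k ++ pt :: all.drop (k+1)) 0 := by
          conv_lhs => rw [hall]
        have e_l' : PySem.List.enumerate (all.eraseIdx k) 0
            = PySem.List.enumerate (all.take k ++ all.drop (k+1)) 0 := by
          rw [List.eraseIdx_eq_take_drop_succ]
        rw [e_all, e_l']
        refine (pv_filter_shift (all.take k) (all.drop (k+1)) pt
          (fun c => (bGreedy (bOrder all) (aTotal all) ((all.length : Int)) PySem.Set.empty).contains c)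
          (fun c => (bGreedy (bOrder (all.eraseIdx k)) (aTotal (all.eraseIdx k)) (((all.eraseIdx k).length : Int)) PySem.Set.empty).contains c)
          ?_ ?_ ?_).symm
        · simp only []
          rw [show ((all.take k).length : Int) = (k:Int) by simp [htl]]
          exact (hmemL (k:Int)).mpr (Or.inl rfl)
        · intro c h0 hck
          rw [show ((all.take k).length : Int) = (k:Int) by simp [htl]] at hck
          simp only []
          apply pv_bool_iff
          rw [hmemR c, hmemL c]
          constructor
          · intro hmm
            obtain ⟨j, hj, hj2⟩ := List.mem_map.mp hmm
            have hjk := hSsub j hj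
            unfold decIdx at hj2
            by_cases hkj : (k:Int) < j
            · rw [if_pos hkj] at hj2
              exact absurd hck (by omega)
            · rw [if_neg hkj] at hj2
              right
              exact hj2 ▸ hj
          · intro hmm
            rcases hmm with rfl | hcS
            · exact absurd hck (by omega)
            · exact List.mem_map.mpr ⟨c, hcS, by unfold decIdx; rw [if_neg (by omega)]⟩
        · intro c hck
          rw [show ((all.take k).length : Int) = (k:Int) by simp [htl]] at hck
          simp only []
          apply pv_bool_iff
          rw [hmemR c, hmemL (c + 1)]
          constructor
          · intro hmm
            obtain ⟨j, hj, hj2⟩ := List.mem_map.mp hmm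
            have hjk := hSsub j hj
            unfold decIdx at hj2
            by_cases hkj : (k:Int) < j
            · rw [if_pos hkj] at hj2
              right
              have hjc : j = c + 1 := by omega
              exact hjc ▸ hj
            · rw [if_neg hkj] at hj2
              exact absurd (by omega : j = (k:Int)) hjk
          · intro hmm
            rcases hmm with hck1 | hcS
            · exact absurd hck1 (by omega)
            · exact List.mem_map.mpr ⟨c + 1, hcS, by unfold decIdx; rw [if_pos (by omega)]; omega⟩

theorem pv_build (cs : List String) : ∀ all : List String,
    cs.foldl bBuildStep (all, PySem.Set.ofList (all.map PySem.Str.lower))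
      = (cs.foldl aAddTag all, PySem.Set.ofList ((cs.foldl aAddTag all).map PySem.Str.lower)) := by
  induction cs with
  | nil => intro all; rfl
  | cons c cs ih =>
    intro all
    simp only [List.foldl_cons]
    cases h : (all.map PySem.Str.lower).contains (PySem.Str.lower c) with
    | true =>
      have hb : bBuildStep (all, PySem.Set.ofList (all.map PySem.Str.lower)) c
          = (all, PySem.Set.ofList (all.map PySem.Str.lower)) := by
        show (if (PySem.Set.ofList (all.map PySem.Str.lower)).contains (PySem.Str.lower c)
            then ((all, PySem.Set.ofList (all.map PySem.Str.lower)) : List String × PySem.Set String)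
            else (all ++ [c], (PySem.Set.ofList (all.map PySem.Str.lower)).add (PySem.Str.lower c))) = _
        rw [pv_ofList_contains, h]
        simp
      have ha : aAddTag all c = all := by
        show (if !((all.map PySem.Str.lower).contains (PySem.Str.lower c)) then all ++ [c] else all) = all
        rw [h]
        simp
      rw [hb, ha, ih]
    | false =>
      have hb : bBuildStep (all, PySem.Set.ofList (all.map PySem.Str.lower)) c
          = (all ++ [c], (PySem.Set.ofList (all.map PySem.Str.lower)).add (PySem.Str.lower c)) := by
        show (if (PySem.Set.ofList (all.map PySem.Str.lower)).contains (PySem.Str.lower c)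
            then ((all, PySem.Set.ofList (all.map PySem.Str.lower)) : List String × PySem.Set String)
            else (all ++ [c], (PySem.Set.ofList (all.map PySem.Str.lower)).add (PySem.Str.lower c))) = _
        rw [pv_ofList_contains, h]
        simp
      have ha : aAddTag all c = all ++ [c] := by
        show (if !((all.map PySem.Str.lower).contains (PySem.Str.lower c)) then all ++ [c] else all) = all ++ [c]
        rw [h]
        simp
      have hset : (PySem.Set.ofList (all.map PySem.Str.lower)).add (PySem.Str.lower c)
          = PySem.Set.ofList ((all ++ [c]).map PySem.Str.lower) := by
        simp [PySem.Set.ofList, List.map_append, List.foldl_append]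
      rw [hb, hset, ha, ih]

-- ===== VERDICT (by name: the statement is the Claim_ definition above) =====
theorem enhance_tags_py_spec : Claim_equal_enhance_tags_py := by
  unfold Claim_equal_enhance_tags_py
  intro tags _
  unfold Spec_enhance_tags_py
  have key : ∀ all2 : List String,
      (if aTotal all2 > 500 then aTrim all2 else all2) =
      (if aTotal all2 ≤ 500 then all2
       else ((PySem.List.enumerate all2 0).filter
          (fun q => !((bGreedy (bOrder all2) (aTotal all2) ((all2.length : Int)) PySem.Set.empty).contains q.1))).map Prod.snd) := by
    intro all2
    by_cases hT : aTotal all2 ≤ 500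
    · rw [if_neg (by omega), if_pos hT]
    · rw [if_pos (by omega), if_neg hT]
      exact pv_trim all2.length all2 le_rfl
  have hmin : min (3 : Int) ((trendingTags.length : Int)) = 3 := by decide
  have hB : bBuild tags = (PySem.List.slice trendingTags none (some 3)).foldl aAddTag
      (essentialTags.foldl aAddTag tags) := by
    unfold bBuild
    rw [pv_build, List.foldl_append]
  have hA2 : (PySem.List.slice trendingTags none (some (min 3 ((trendingTags.length : Int))))).foldl
      aAddTag (essentialTags.foldl aAddTag tags) = bBuild tags := by
    rw [hmin, hB]
  show enhance_tags_py tags = enhance_tags_py_alt tags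
  calc enhance_tags_py tags
      = (if aTotal (bBuild tags) > 500 then aTrim (bBuild tags) else bBuild tags) := by
        show (if aTotal ((PySem.List.slice trendingTags none (some (min 3 ((trendingTags.length : Int))))).foldl
            aAddTag (essentialTags.foldl aAddTag tags)) > 500
          then aTrim ((PySem.List.slice trendingTags none (some (min 3 ((trendingTags.length : Int))))).foldl
            aAddTag (essentialTags.foldl aAddTag tags))
          else ((PySem.List.slice trendingTags none (some (min 3 ((trendingTags.length : Int))))).foldl
            aAddTag (essentialTags.foldl aAddTag tags))) = _
        rw [hA2]
    _ = enhance_tags_py_alt tags := by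
        rw [key (bBuild tags)]
        rfl
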